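-- pv_equiv track=rewrite | github.com/evdanil/cn-tool | utils/process_data.py | _dedupe_dhcp_option_rows
-- ===== SOURCE A (Python) =====
-- from typing import Dict, List, Any, Optional
--
-- def _dedupe_dhcp_option_rows(rows: List[Dict[str, Any]]) -> List[Dict[str, Any]]:
--     deduped_rows: List[Dict[str, Any]] = []
--     row_index_by_key: Dict[tuple[str, str, str, str, str], int] = {}
--
--     for row in rows:
--         key = (
--             str(row.get("name", "")),
--             str(row.get("num", "")),
--             str(row.get("value", "")),
--             str(row.get("vendor class", "")),
--             str(row.get("use option", "")),
--         )
--         existing_index = row_index_by_key.get(key)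
--         if existing_index is None:
--             deduped_rows.append(dict(row))
--             row_index_by_key[key] = len(deduped_rows) - 1
--             continue
--
--         if row.get("inherited"):
--             deduped_rows[existing_index]["inherited"] = "Yes"
--         if row.get("decoded value") and not deduped_rows[existing_index].get("decoded value"):
--             deduped_rows[existing_index]["decoded value"] = row["decoded value"]
--
--     return deduped_rows
-- ===== SOURCE B (Python) =====
-- from typing import Dict, List, Any
--
--
-- def _dedupe_dhcp_option_rows(rows: List[Dict[str, Any]]) -> List[Dict[str, Any]]:
--     def key_of(row: Dict[str, Any]) -> tuple:
--         return (
--             str(row.get("name", "")),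
--             str(row.get("num", "")),
--             str(row.get("value", "")),
--             str(row.get("vendor class", "")),
--             str(row.get("use option", "")),
--         )
--
--     result: List[Dict[str, Any]] = []
--     for key in dict.fromkeys(map(key_of, rows)):
--         group = [row for row in rows if key_of(row) == key]
--         merged = dict(group[0])
--         for row in group[1:]:
--             if row.get("inherited"):
--                 merged["inherited"] = "Yes"
--             if row.get("decoded value") and not merged.get("decoded value"):
--                 merged["decoded value"] = row["decoded value"]
--         result.append(merged)
--     return result
-- ===== Notes on version B (the rewrite author's own statement) =====
-- stated objective: alternative
-- what changed: Replaces the single interleaved pass that mutates earlier output rows through a key->index table with a two-level structure: first compute the distinct keys in first-occurrence order (dict.fromkeys), then for each key filter its group out of the input and fold the merge over the group, so no output row is ever revisited or edited in place.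
import Mathlib
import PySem

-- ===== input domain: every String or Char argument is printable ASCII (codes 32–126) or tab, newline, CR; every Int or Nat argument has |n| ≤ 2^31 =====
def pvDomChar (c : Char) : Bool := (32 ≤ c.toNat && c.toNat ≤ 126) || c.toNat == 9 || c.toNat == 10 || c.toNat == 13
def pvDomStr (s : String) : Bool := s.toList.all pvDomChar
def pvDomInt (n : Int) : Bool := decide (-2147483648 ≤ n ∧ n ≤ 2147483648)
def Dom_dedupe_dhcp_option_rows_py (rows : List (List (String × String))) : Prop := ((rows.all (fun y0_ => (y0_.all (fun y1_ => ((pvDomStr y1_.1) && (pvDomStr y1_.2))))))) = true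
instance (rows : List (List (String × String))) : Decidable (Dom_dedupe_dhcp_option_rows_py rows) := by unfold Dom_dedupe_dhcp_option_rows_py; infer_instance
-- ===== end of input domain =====

-- B folds each key's group separately instead of editing earlier output rows in place through an index table; return value proved equal, mutation of the result list is internal to A.

-- shared helpers: row.get(k, "") on a row-dict, and the 5-tuple key both Pythons compute
def pvRGet (row : List (String × String)) (k : String) : String :=
  (PySem.Dict.mk row).getD k ""

def pvKeyOf (row : List (String × String)) : String × String × String × String × String :=
  (pvRGet row "name", pvRGet row "num", pvRGet row "value", pvRGet row "vendor class", pvRGet row "use option")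

-- ===== PORT A =====
-- one loop state: (deduped_rows, row_index_by_key); deduped_rows[i][k] = v is ported as List.set i (Dict-insert)
def pvStepA (st : List (List (String × String)) × PySem.Dict (String × String × String × String × String) Int)
    (row : List (String × String)) : List (List (String × String)) × PySem.Dict (String × String × String × String × String) Int :=
  let ded := st.1
  let idx := st.2
  let key := pvKeyOf row
  match idx.get? key with
  | none =>
      let ded' := ded ++ [row]
      (ded', idx.insert key ((ded'.length : Int) - 1))
  | some i =>
      let n := i.toNat
      let ded1 := if pvRGet row "inherited" ≠ "" then
          ded.set n ((PySem.Dict.mk (ded.getD n [])).insert "inherited" "Yes").items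
        else ded
      let ded2 := if pvRGet row "decoded value" ≠ "" ∧ pvRGet (ded1.getD n []) "decoded value" = "" then
          ded1.set n ((PySem.Dict.mk (ded1.getD n [])).insert "decoded value" (pvRGet row "decoded value")).items
        else ded1
      (ded2, idx)

def dedupe_dhcp_option_rows_py (rows : List (List (String × String))) : List (List (String × String)) :=
  (rows.foldl pvStepA ([], PySem.Dict.empty)).1

-- ===== PORT B =====
-- merge one later row of a group into the accumulated merged row
def pvMergeStep (out : List (String × String)) (row : List (String × String)) : List (String × String) :=
  let out1 := if pvRGet row "inherited" ≠ "" then ((PySem.Dict.mk out).insert "inherited" "Yes").items else out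
  if pvRGet row "decoded value" ≠ "" ∧ pvRGet out1 "decoded value" = "" then
    ((PySem.Dict.mk out1).insert "decoded value" (pvRGet row "decoded value")).items
  else out1

-- merged = dict(group[0]); fold pvMergeStep over group[1:] (a group coming from a key of rows is never empty)
def pvMergeGroup (g : List (List (String × String))) : List (String × String) :=
  match g with
  | [] => []
  | r :: rest => rest.foldl pvMergeStep r

def dedupe_dhcp_option_rows_py_alt (rows : List (List (String × String))) : List (List (String × String)) :=
  (PySem.List.dedup (rows.map pvKeyOf)).map
    (fun k => pvMergeGroup (rows.filter (fun r => pvKeyOf r == k)))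

-- ===== PRECONDITION & SPEC =====
def Spec_dedupe_dhcp_option_rows_py (rows : List (List (String × String))) (out : List (List (String × String))) : Prop := out = dedupe_dhcp_option_rows_py_alt rows
instance (rows : List (List (String × String))) (out : List (List (String × String))) : Decidable (Spec_dedupe_dhcp_option_rows_py rows out) := by unfold Spec_dedupe_dhcp_option_rows_py; infer_instance

-- ===== CLAIM (what is proved, stated in full; the proofs are below) =====
def Claim_equal_dedupe_dhcp_option_rows_py : Prop := ∀ (rows : List (List (String × String))), Dom_dedupe_dhcp_option_rows_py rows → Spec_dedupe_dhcp_option_rows_py rows (dedupe_dhcp_option_rows_py rows)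

-- ===== LEMMAS AND PROOFS =====

-- position of the first occurrence of k in l
def pvPos {α : Type} [DecidableEq α] (l : List α) (k : α) : Option Nat :=
  match l with
  | [] => none
  | a :: t => if a = k then some 0 else (pvPos t k).map (· + 1)

theorem pvPos_none_iff {α : Type} [DecidableEq α] (l : List α) (k : α) :
    pvPos l k = none ↔ k ∉ l := by
  induction l with
  | nil => simp [pvPos]
  | cons a t ih =>
    by_cases h : a = k
    · simp [pvPos, h]
    · simp [pvPos, h, ih, Option.map_eq_none_iff]
      exact fun _ he => h he.symm

theorem pvPos_some_lt {α : Type} [DecidableEq α] {l : List α} {k : α} {i : Nat}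
    (h : pvPos l k = some i) : i < l.length := by
  induction l generalizing i with
  | nil => simp [pvPos] at h
  | cons a t ih =>
    by_cases ha : a = k
    · simp [pvPos, ha] at h
      simp [List.length_cons]
      omega
    · simp [pvPos, ha] at h
      obtain ⟨j, hj, rfl⟩ := h
      have := ih hj
      simp [List.length_cons]
      omega

theorem pvPos_some_get {α : Type} [DecidableEq α] {l : List α} {k : α} {i : Nat}
    (h : pvPos l k = some i) : l[i]? = some k := by
  induction l generalizing i with
  | nil => simp [pvPos] at h
  | cons a t ih =>
    by_cases ha : a = k
    · simp [pvPos, ha] at h; subst h; simp [ha]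
    · simp [pvPos, ha] at h
      obtain ⟨j, hj, rfl⟩ := h
      simpa using ih hj

theorem pvPos_append_of_none {α : Type} [DecidableEq α] {l : List α} {k : α} (a : α)
    (h : pvPos l k = none) :
    pvPos (l ++ [a]) k = if a = k then some l.length else none := by
  induction l with
  | nil => simp [pvPos]
  | cons b t ih =>
    by_cases hb : b = k
    · simp [pvPos, hb] at h
    · simp [pvPos, hb] at h ⊢
      rw [ih h]
      by_cases hak : a = k <;> simp [hak]

theorem pvPos_append_of_some {α : Type} [DecidableEq α] {l : List α} {k : α} {i : Nat} (a : α)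
    (h : pvPos l k = some i) : pvPos (l ++ [a]) k = some i := by
  induction l generalizing i with
  | nil => simp [pvPos] at h
  | cons b t ih =>
    by_cases hb : b = k
    · simp [pvPos, hb] at h ⊢; omega
    · simp [pvPos, hb] at h ⊢
      obtain ⟨j, hj, rfl⟩ := h
      exact ⟨j, ih hj, rfl⟩

-- updating exactly the k-entry of a map over a nodup list is List.set at k's position
theorem pvMap_set {α β : Type} [DecidableEq α] {l : List α} {k : α} {i : Nat}
    (hnd : l.Nodup) (hp : pvPos l k = some i) (f : α → β) (b : β) :
    l.map (fun x => if x = k then b else f x) = (l.map f).set i b := by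
  induction l generalizing i with
  | nil => simp [pvPos] at hp
  | cons a t ih =>
    by_cases ha : a = k
    · simp [pvPos, ha] at hp
      subst hp
      subst ha
      simp only [List.map_cons, List.set_cons_zero]
      congr 1
      apply List.map_congr_left
      intro x hx
      have : x ≠ a := by rintro rfl; exact (List.nodup_cons.mp hnd).1 hx
      simp [this]
    · simp [pvPos, ha] at hp
      obtain ⟨j, hj, rfl⟩ := hp
      simp only [List.map_cons, List.set_cons_succ, if_neg ha]
      congr 1
      exact ih (List.nodup_cons.mp hnd).2 hj

-- folding one more row into a nonempty group
theorem pvMergeGroup_append {g : List (List (String × String))} (hg : g ≠ []) (r : List (String × String)) :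
    pvMergeGroup (g ++ [r]) = pvMergeStep (pvMergeGroup g) r := by
  cases g with
  | nil => exact absurd rfl hg
  | cons a t => simp [pvMergeGroup, List.foldl_append]

-- the two conditional in-place edits of A at index n are one List.set with pvMergeStep
theorem pvStepA_set (ded : List (List (String × String))) (row : List (String × String)) {n : Nat}
    (hn : n < ded.length) :
    (let ded1 := if pvRGet row "inherited" ≠ "" then
          ded.set n ((PySem.Dict.mk (ded.getD n [])).insert "inherited" "Yes").items
        else ded
      if pvRGet row "decoded value" ≠ "" ∧ pvRGet (ded1.getD n []) "decoded value" = "" then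
        ded1.set n ((PySem.Dict.mk (ded1.getD n [])).insert "decoded value" (pvRGet row "decoded value")).items
      else ded1) = ded.set n (pvMergeStep (ded.getD n []) row) := by
  have hget : ∀ (x : List (String × String)), (ded.set n x).getD n [] = x := by
    intro x
    simp [List.getD_eq_getElem?_getD, hn]
  have hself : ded.set n (ded.getD n []) = ded := by
    rw [List.getD_eq_getElem?_getD]
    simp [List.getElem?_eq_getElem hn]
  simp only [pvMergeStep]
  by_cases h1 : pvRGet row "inherited" ≠ ""
  · simp only [if_pos h1, hget]
    by_cases h2 : pvRGet row "decoded value" ≠ "" ∧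
        pvRGet ((PySem.Dict.mk (ded.getD n [])).insert "inherited" "Yes").items "decoded value" = ""
    · simp only [if_pos h2, List.set_set]
    · simp only [if_neg h2]
  · simp only [if_neg h1]
    by_cases h2 : pvRGet row "decoded value" ≠ "" ∧ pvRGet (ded.getD n []) "decoded value" = ""
    · simp only [if_pos h2]
    · simp only [if_neg h2, hself]

-- keys / groups abbreviations used by the invariant
def pvKeys (p : List (List (String × String))) : List (String × String × String × String × String) :=
  PySem.List.dedup (p.map pvKeyOf)

def pvGrp (p : List (List (String × String))) (k : String × String × String × String × String) :
    List (List (String × String)) :=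
  p.filter (fun r => pvKeyOf r == k)

-- evaluating one step of A's loop, new key
theorem pvStepA_none (st : List (List (String × String)) × PySem.Dict (String × String × String × String × String) Int)
    (r : List (String × String)) (h : st.2.get? (pvKeyOf r) = none) :
    pvStepA st r = (st.1 ++ [r], st.2.insert (pvKeyOf r) (((st.1 ++ [r]).length : Int) - 1)) := by
  simp only [pvStepA, h]

-- evaluating one step of A's loop, seen key
theorem pvStepA_some (st : List (List (String × String)) × PySem.Dict (String × String × String × String × String) Int)
    (r : List (String × String)) (i : Nat) (h : st.2.get? (pvKeyOf r) = some (Int.ofNat i))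
    (hn : i < st.1.length) :
    pvStepA st r = (st.1.set i (pvMergeStep (st.1.getD i []) r), st.2) := by
  simp only [pvStepA, h]
  have : (Int.ofNat i).toNat = i := rfl
  rw [this]
  rw [pvStepA_set st.1 r hn]

theorem pvKeys_append (p : List (List (String × String))) (r : List (String × String)) :
    pvKeys (p ++ [r]) =
      if pvKeyOf r ∈ pvKeys p then pvKeys p else pvKeys p ++ [pvKeyOf r] := by
  simp only [pvKeys, List.map_append, List.map_cons, List.map_nil,
    PySem.List.dedup_eq_ofList, PySem.Set.ofList_append_singleton, PySem.Set.add_eq_ite]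

theorem pvGrp_append (p : List (List (String × String))) (r : List (String × String))
    (k : String × String × String × String × String) :
    pvGrp (p ++ [r]) k = pvGrp p k ++ if pvKeyOf r = k then [r] else [] := by
  simp only [pvGrp, List.filter_append, List.filter_cons, List.filter_nil, beq_iff_eq]

theorem pvGrp_ne_nil {p : List (List (String × String))} {k : String × String × String × String × String}
    (h : k ∈ p.map pvKeyOf) : pvGrp p k ≠ [] := by
  obtain ⟨r0, hr0, hk⟩ := List.mem_map.mp h
  exact List.ne_nil_of_mem (List.mem_filter.mpr ⟨hr0, by simp [hk]⟩)

theorem pvGrp_eq_nil {p : List (List (String × String))} {k : String × String × String × String × String}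
    (h : k ∉ p.map pvKeyOf) : pvGrp p k = [] := by
  simp only [pvGrp]
  rw [List.filter_eq_nil_iff]
  intro r0 hr0
  simp only [beq_iff_eq]
  intro hk
  exact h (List.mem_map.mpr ⟨r0, hr0, hk⟩)

theorem pvAlt_eq (p : List (List (String × String))) :
    dedupe_dhcp_option_rows_py_alt p = (pvKeys p).map (fun k => pvMergeGroup (pvGrp p k)) := rfl

theorem pvInvA (p : List (List (String × String))) :
    (p.foldl pvStepA ([], PySem.Dict.empty)).1 = dedupe_dhcp_option_rows_py_alt p ∧
    ∀ k, (p.foldl pvStepA ([], PySem.Dict.empty)).2.get? k = (pvPos (pvKeys p) k).map Int.ofNat := by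
  induction p using List.reverseRecOn with
  | nil => exact ⟨rfl, fun k => rfl⟩
  | append_singleton p r ih =>
    obtain ⟨ih1, ih2⟩ := ih
    rw [List.foldl_append, List.foldl_cons, List.foldl_nil]
    have hmem : pvKeyOf r ∈ pvKeys p ↔ pvKeyOf r ∈ p.map pvKeyOf := by
      simp [pvKeys, PySem.List.dedup_eq_ofList, PySem.Set.mem_ofList]
    have hnd : (pvKeys p).Nodup := by
      simp only [pvKeys, PySem.List.dedup_eq_ofList]
      exact PySem.Set.nodup_ofList _
    have hlen : (p.foldl pvStepA ([], PySem.Dict.empty)).1.length = (pvKeys p).length := by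
      rw [ih1, pvAlt_eq, List.length_map]
    cases hpos : pvPos (pvKeys p) (pvKeyOf r) with
    | none =>
      have hnotin : pvKeyOf r ∉ pvKeys p := (pvPos_none_iff _ _).mp hpos
      have hkeys : pvKeys (p ++ [r]) = pvKeys p ++ [pvKeyOf r] := by
        rw [pvKeys_append, if_neg hnotin]
      have hnone : (p.foldl pvStepA ([], PySem.Dict.empty)).2.get? (pvKeyOf r) = none := by
        rw [ih2, hpos]; rfl
      rw [pvStepA_none _ _ hnone]
      constructor
      · show _ ++ [r] = _
        rw [pvAlt_eq, hkeys, List.map_append, ih1, pvAlt_eq]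
        congr 1
        · apply List.map_congr_left
          intro k hk
          rw [pvGrp_append, if_neg (by intro h; subst h; exact hnotin hk), List.append_nil]
        · simp only [List.map_cons, List.map_nil]
          rw [pvGrp_append, if_pos rfl, pvGrp_eq_nil (fun h => hnotin (hmem.mpr h))]
          rfl
      · intro k
        show (PySem.Dict.insert _ _ _).get? k = _
        rw [PySem.Dict.get?_insert, hkeys]
        by_cases hk : k = pvKeyOf r
        · subst hk
          rw [if_pos rfl, pvPos_append_of_none _ hpos, if_pos rfl]
          simp only [Option.map_some]
          congr 1
          simp only [List.length_append, List.length_cons, List.length_nil, hlen,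
            Int.ofNat_eq_natCast]
          push_cast
          omega
        · rw [if_neg hk]
          cases hp : pvPos (pvKeys p) k with
          | none =>
            rw [pvPos_append_of_none _ hp, if_neg (fun h => hk h.symm), ih2, hp]
          | some j =>
            rw [pvPos_append_of_some _ hp, ih2, hp]
    | some i =>
      have hin : pvKeyOf r ∈ pvKeys p := by
        by_contra hc
        rw [(pvPos_none_iff _ _).mpr hc] at hpos
        simp at hpos
      have hkeys : pvKeys (p ++ [r]) = pvKeys p := by
        rw [pvKeys_append, if_pos hin]
      have hlt : i < (pvKeys p).length := pvPos_some_lt hpos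
      have hsome : (p.foldl pvStepA ([], PySem.Dict.empty)).2.get? (pvKeyOf r) = some (Int.ofNat i) := by
        rw [ih2, hpos]; rfl
      rw [pvStepA_some _ _ i hsome (hlen ▸ hlt)]
      have hgetd : (p.foldl pvStepA ([], PySem.Dict.empty)).1.getD i [] = pvMergeGroup (pvGrp p (pvKeyOf r)) := by
        rw [ih1, pvAlt_eq, List.getD_eq_getElem?_getD, List.getElem?_map, pvPos_some_get hpos]
        rfl
      constructor
      · show List.set _ _ _ = _
        rw [hgetd, pvAlt_eq, hkeys]
        have hcong : ∀ k ∈ pvKeys p, pvMergeGroup (pvGrp (p ++ [r]) k) =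
            (fun x => if x = pvKeyOf r then pvMergeStep (pvMergeGroup (pvGrp p (pvKeyOf r))) r
                      else pvMergeGroup (pvGrp p x)) k := by
          intro k hk
          by_cases hkr : k = pvKeyOf r
          · subst hkr
            simp [pvGrp_append, pvMergeGroup_append (pvGrp_ne_nil (hmem.mp hk)) r]
          · rw [pvGrp_append, if_neg (show ¬pvKeyOf r = k from fun h => hkr h.symm),
              List.append_nil]
            simp [hkr]
        rw [List.map_congr_left hcong,
          pvMap_set hnd hpos (fun k => pvMergeGroup (pvGrp p k)), ih1, pvAlt_eq]
      · intro k
        rw [ih2, hkeys]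

-- ===== VERDICT (by name: the statement is the Claim_ definition above) =====
theorem dedupe_dhcp_option_rows_py_spec : Claim_equal_dedupe_dhcp_option_rows_py := by
  intro rows _
  unfold Spec_dedupe_dhcp_option_rows_py dedupe_dhcp_option_rows_py
  exact (pvInvA rows).1
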